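-- pv_equiv track=rewrite | github.com/camrdale/advent-of-code | year2015/day20/part1.py | num_presents
-- ===== SOURCE A (Python) =====
-- import math
--
-- def num_presents(house: int) -> int:
--     step = 1
--     if house % 2 == 1:
--         step = 2
--
--     presents = 0
--     for elf in range(1, int(math.sqrt(house)) + 1, step):
--         if house % elf == 0:
--             presents += 10 * elf
--             if elf != house // elf:
--                 presents += 10 * (house // elf)
--
--     return presents
-- ===== SOURCE B (Python) =====
-- def num_presents(house: int) -> int:
--     # sigma(house), times ten, via prime factorization (trial division).
--     if house == 0:
--         return 0
--     n = house
--     total = 1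
--     p = 2
--     while p * p <= n:
--         if n % p == 0:
--             e = 0
--             while n % p == 0:
--                 n //= p
--                 e += 1
--             total *= (p ** (e + 1) - 1) // (p - 1)
--         p += 1
--     if n > 1:
--         total *= n + 1
--     return 10 * total
-- ===== Notes on version B (the rewrite author's own statement) =====
-- stated objective: alternative
-- what changed: B computes ten times sigma(house) from the prime factorization by trial division (multiplying geometric-series factors (p^(e+1)-1)//(p-1)) instead of enumerating divisor pairs up to sqrt(house).
import Mathlib
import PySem

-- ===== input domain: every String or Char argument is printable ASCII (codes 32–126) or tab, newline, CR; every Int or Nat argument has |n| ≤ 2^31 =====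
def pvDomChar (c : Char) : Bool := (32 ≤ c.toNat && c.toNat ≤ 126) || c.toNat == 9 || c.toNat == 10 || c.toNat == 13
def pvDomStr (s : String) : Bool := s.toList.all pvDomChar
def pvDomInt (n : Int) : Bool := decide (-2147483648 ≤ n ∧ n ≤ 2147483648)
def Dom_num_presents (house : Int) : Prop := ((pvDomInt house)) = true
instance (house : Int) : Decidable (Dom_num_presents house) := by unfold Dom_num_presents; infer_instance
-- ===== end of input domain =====

-- B re-implements num_presents as ten times sigma(house) via trial-division prime factorization
-- instead of A's divisor-pair enumeration up to sqrt(house); equivalence proved for house ≥ 0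
-- (A raises ValueError on negative house, excluded by Pre_).


-- ===== PORT A =====
def num_presents (house : Int) : Int :=
  let step : Int := if PySem.Int.mod house 2 == 1 then 2 else 1
  -- int(math.sqrt(house)): exact floor square root for 0 ≤ house ≤ 2^31 (the float sqrt is
  -- exactly floored there); for negative house Python raises ValueError (outside Pre_).
  let isq : Int := (house.toNat.sqrt : Int)
  (PySem.List.pyRange 1 (isq + 1) step).foldl
    (fun presents elf =>
      if PySem.Int.mod house elf == 0 then
        presents + 10 * elf +
          (if elf != PySem.Int.floordiv house elf then 10 * PySem.Int.floordiv house elf else 0)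
      else presents) 0

-- ===== PORT B =====
-- inner `while n % p == 0: n //= p; e += 1` of Source B (guards 2 ≤ p, 0 < n only make it total;
-- they hold at every call site for house > 0)
def pvExtract (n p e : Nat) : Nat × Nat :=
  if h : 2 ≤ p ∧ 0 < n ∧ n % p = 0 then pvExtract (n / p) p (e + 1) else (n, e)
  termination_by n
  decreasing_by exact Nat.div_lt_self h.2.1 (by omega)

lemma pvExtract_fst_le (n p e : Nat) : (pvExtract n p e).1 ≤ n := by
  fun_induction pvExtract with
  | case1 _ _ _ ih => exact le_trans ih (Nat.div_le_self _ _)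
  | case2 => exact le_refl _

-- outer `while p * p <= n` of Source B (the 2 ≤ p conjunct only makes termination evident; p ≥ 2 always)
def pvFactorLoop (n p total : Nat) : Nat :=
  if h : p * p ≤ n ∧ 2 ≤ p then
    if n % p = 0 then
      let ne := pvExtract n p 0
      pvFactorLoop ne.1 (p + 1) (total * ((p ^ (ne.2 + 1) - 1) / (p - 1)))
    else
      pvFactorLoop n (p + 1) total
  else
    if 1 < n then total * (n + 1) else total
  termination_by 2 * n - p
  decreasing_by
  · have h1 : (pvExtract n p 0).1 ≤ n := pvExtract_fst_le n p 0
    have h2 : p ≤ p * p := Nat.le_mul_of_pos_left p (by omega)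
    omega
  · have h2 : p ≤ p * p := Nat.le_mul_of_pos_left p (by omega)
    omega

def num_presents_alt (house : Int) : Int :=
  -- Source B works on nonnegative ints here; house.toNat is exact on Pre_ (house ≥ 0)
  if house == 0 then 0
  else (10 * pvFactorLoop house.toNat 2 1 : Nat)

-- ===== PRECONDITION & SPEC =====
-- Pre_ excludes negative house, on which A raises ValueError (math.sqrt of a negative).
def Pre_num_presents (house : Int) : Prop := 0 ≤ house
instance (house : Int) : Decidable (Pre_num_presents house) := by unfold Pre_num_presents; infer_instance
def pvWitness_num_presents : Int := 6

def Spec_num_presents (house : Int) (out : Int) : Prop := out = num_presents_alt house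
instance (house : Int) (out : Int) : Decidable (Spec_num_presents house out) := by unfold Spec_num_presents; infer_instance

-- ===== CLAIM (what is proved, stated in full; the proofs are below) =====
def Claim_equal_num_presents : Prop := ∀ (house : Int), Dom_num_presents house → Pre_num_presents house → Spec_num_presents house (num_presents house)

-- ===== LEMMAS AND PROOFS =====

-- A's per-elf contribution, at Nat level
def pvFA (N d : Nat) : Nat :=
  if N % d = 0 then 10 * d + (if d ≠ N / d then 10 * (N / d) else 0) else 0

-- B-side: pvExtract extracts the full power of p
lemma pvExtract_spec (n p e : Nat) (h2 : 2 ≤ p) :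
    0 < n → ∃ k n', pvExtract n p e = (n', e + k) ∧ n = p ^ k * n' ∧ ¬ p ∣ n' := by
  fun_induction pvExtract n p e with
  | case1 n e h ih =>
    intro hn
    have hdvd : p ∣ n := Nat.dvd_of_mod_eq_zero h.2.2
    obtain ⟨k, n', heq, hfac, hnd⟩ := ih (Nat.div_pos (Nat.le_of_dvd hn hdvd) (by omega))
    refine ⟨k + 1, n', ?_, ?_, hnd⟩
    · rw [heq]; congr 1; omega
    · have hmul : p * (n / p) = n := Nat.mul_div_cancel' hdvd
      rw [← hmul, hfac]; ring
  | case2 n e h =>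
    intro hn
    refine ⟨0, n, by simp, by simp, ?_⟩
    intro hd
    exact h ⟨h2, hn, Nat.mod_eq_zero_of_dvd hd⟩

-- sigma of a prime power is the geometric factor Source B multiplies in
lemma pvGeom (p k : Nat) (hp : 2 ≤ p) :
    (p ^ (k + 1) - 1) / (p - 1) = ∑ i ∈ Finset.range (k + 1), p ^ i := by
  have hmul : (p - 1) * ∑ i ∈ Finset.range (k + 1), p ^ i = p ^ (k + 1) - 1 := by
    induction k with
    | zero => simp
    | succ k ih =>
      rw [Finset.sum_range_succ, Nat.mul_add, ih, Nat.sub_mul, one_mul]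
      have h1 : 1 ≤ p ^ (k + 1) := Nat.one_le_pow _ _ (by omega)
      have h2 : p ^ (k + 1 + 1) = p * p ^ (k + 1) := by ring
      have h3 : p ^ (k + 1) ≤ p * p ^ (k + 1) := Nat.le_mul_of_pos_left _ (by omega)
      omega
  rw [← hmul, Nat.mul_div_cancel_left _ (by omega : 0 < p - 1)]

-- B-side main invariant: pvFactorLoop accumulates sigma over the factored-out part
lemma pvFactorLoop_sigma (n p total : Nat) :
    2 ≤ p → 0 < n → (∀ q, q.Prime → q ∣ n → p ≤ q) →
    pvFactorLoop n p total = total * ∑ d ∈ n.divisors, d := by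
  fun_induction pvFactorLoop n p total with
  | case1 n p total h hd ne ih =>
    intro h2 hn hinv
    have hp : p.Prime := by
      have hmin : p.minFac ∣ n := (Nat.minFac_dvd p).trans (Nat.dvd_of_mod_eq_zero hd)
      have hle := hinv p.minFac (Nat.minFac_prime (by omega)) hmin
      have hge := Nat.minFac_le (by omega : 0 < p)
      have heq : p.minFac = p := le_antisymm hge hle
      rw [← heq]; exact Nat.minFac_prime (by omega)
    obtain ⟨k, n', heq, hfac, hnd⟩ := pvExtract_spec n p 0 h2 hn
    have hn' : 0 < n' := by
      rcases Nat.eq_zero_or_pos n' with h0 | h0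
      · subst h0; simp at hfac; omega
      · exact h0
    have hinv' : ∀ q, q.Prime → q ∣ n' → p + 1 ≤ q := by
      intro q hq hdq
      have hqn : q ∣ n := by rw [hfac]; exact Dvd.dvd.mul_left hdq _
      have := hinv q hq hqn
      have hne : q ≠ p := fun he => hnd (he ▸ hdq)
      omega
    have hcop : Nat.Coprime (p ^ k) n' :=
      Nat.Coprime.pow_left _ ((Nat.Prime.coprime_iff_not_dvd hp).mpr hnd)
    have hmulσ : ∑ d ∈ (p ^ k * n').divisors, d
        = (∑ d ∈ (p ^ k).divisors, d) * ∑ d ∈ n'.divisors, d := by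
      have hm := (ArithmeticFunction.isMultiplicative_sigma (k := 1)).map_mul_of_coprime hcop
      simpa [ArithmeticFunction.sigma_one_apply] using hm
    have hsig : ∑ d ∈ (p ^ k).divisors, d = ∑ i ∈ Finset.range (k + 1), p ^ i :=
      Nat.sum_divisors_prime_pow hp
    have hne1 : ne.1 = n' := by rw [show ne = pvExtract n p 0 from rfl, heq]
    have hne2 : ne.2 = 0 + k := by rw [show ne = pvExtract n p 0 from rfl, heq]
    rw [hne1, hne2] at ih ⊢
    rw [ih (by omega) hn' hinv', hfac, hmulσ, hsig, Nat.zero_add, ← pvGeom p k h2]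
    ring
  | case2 n p total h hd ih =>
    intro h2 hn hinv
    apply ih (by omega) hn
    intro q hq hdq
    have := hinv q hq hdq
    have hne : q ≠ p := by
      intro he; rw [he] at hdq
      exact hd (Nat.mod_eq_zero_of_dvd hdq)
    omega
  | case3 n p total h h1 =>
    intro h2 hn hinv
    have hnp : n.Prime := by
      by_contra hc
      have hsq := Nat.minFac_sq_le_self (by omega) hc
      have hge := hinv n.minFac (Nat.minFac_prime (by omega)) (Nat.minFac_dvd n)
      have hmm : p * p ≤ n.minFac * n.minFac := Nat.mul_le_mul hge hge
      have hsq' : n.minFac ^ 2 = n.minFac * n.minFac := sq n.minFac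
      have hlt : n < p * p := by omega
      omega
    rw [hnp.divisors, Finset.sum_pair (by omega : (1 : ℕ) ≠ n)]
    ring
  | case4 n p total h h1 =>
    intro h2 hn hinv
    have : n = 1 := by omega
    subst this
    simp [Nat.divisors_one]

-- A-side: the fold is the running sum of per-elf contributions
lemma pvFoldA (N : Nat) (L : List Int) (init : Int) :
    L.foldl (fun presents elf =>
      if PySem.Int.mod (N : Int) elf == 0 then
        presents + 10 * elf +
          (if elf != PySem.Int.floordiv (N : Int) elf then 10 * PySem.Int.floordiv (N : Int) elf else 0)
      else presents) init
    = init + (L.map (fun elf =>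
        if PySem.Int.mod (N : Int) elf == 0 then
          10 * elf + (if elf != PySem.Int.floordiv (N : Int) elf then 10 * PySem.Int.floordiv (N : Int) elf else 0)
        else 0)).sum := by
  induction L generalizing init with
  | nil => simp
  | cons e L ih => simp only [List.foldl_cons, List.map_cons, List.sum_cons, ih]; split <;> ring

-- the Int-level per-elf contribution is the cast of pvFA
lemma pvBody_cast (N d : Nat) :
    (if PySem.Int.mod (N : Int) (d : Int) == 0 then
      10 * (d : Int) + (if (d : Int) != PySem.Int.floordiv (N : Int) (d : Int) then 10 * PySem.Int.floordiv (N : Int) (d : Int) else 0)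
     else 0) = (pvFA N d : Int) := by
  simp only [PySem.Int.mod_natCast, PySem.Int.floordiv_natCast, pvFA, beq_iff_eq, bne_iff_ne,
    Nat.cast_eq_zero, ne_eq, Nat.cast_inj]
  split_ifs <;> push_cast <;> ring

lemma pvListSum (n : Nat) (f : Nat → Int) :
    ((List.range n).map f).sum = ∑ i ∈ Finset.range n, f i := by
  induction n with
  | zero => simp
  | succ n ih => rw [List.range_succ, Finset.sum_range_succ, ← ih]; simp

lemma pvIccReindex (r : Nat) (f : Nat → Nat) :
    ∑ k ∈ Finset.range r, f (1 + k) = ∑ d ∈ Finset.Icc 1 r, f d := by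
  refine Finset.sum_nbij' (fun k => 1 + k) (fun d => d - 1) ?_ ?_ ?_ ?_ ?_ <;>
    intro a ha <;> simp only [Finset.mem_range, Finset.mem_Icc] at * <;> omega

-- odd N: the elves 1,3,5,… ≤ sqrt N pick up every nonzero contribution
lemma pvOddReindex (N : Nat) (hodd : N % 2 = 1) :
    ∑ k ∈ Finset.range ((N.sqrt + 1) / 2), pvFA N (1 + 2 * k)
      = ∑ d ∈ Finset.Icc 1 N.sqrt, pvFA N d := by
  have hfull : ∑ d ∈ Finset.Icc 1 N.sqrt with d % 2 = 1, pvFA N d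
      = ∑ d ∈ Finset.Icc 1 N.sqrt, pvFA N d := by
    apply Finset.sum_filter_of_ne
    intro d _ hne
    unfold pvFA at hne
    by_contra hev
    have hd2 : d % 2 = 0 := by omega
    have hdvd : ¬ N % d = 0 := by
      intro hmod
      have h2d : 2 ∣ d := Nat.dvd_of_mod_eq_zero hd2
      have h2N : 2 ∣ N := h2d.trans (Nat.dvd_of_mod_eq_zero hmod)
      omega
    rw [if_neg hdvd] at hne
    exact hne rfl
  rw [← hfull]
  refine Finset.sum_nbij' (fun k => 1 + 2 * k) (fun d => d / 2) ?_ ?_ ?_ ?_ ?_ <;>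
    intro a ha <;>
    simp only [Finset.mem_range, Finset.mem_filter, Finset.mem_Icc] at * <;>
    try omega

lemma pvDivSq (N a : Nat) (hN : 1 ≤ N) (hdvd : a ∣ N) (hlt : a * a < N) :
    N / a ∣ N ∧ N < (N / a) * (N / a) := by
  have ha1 : 1 ≤ a := Nat.pos_of_dvd_of_pos hdvd (by omega)
  have hm : a * (N / a) = N := Nat.mul_div_cancel' hdvd
  have hx1 : a < N / a := by nlinarith
  exact ⟨⟨a, (Nat.div_mul_cancel hdvd).symm⟩, by nlinarith⟩

lemma pvDivSq' (N a : Nat) (hN : 1 ≤ N) (hdvd : a ∣ N) (hgt : N < a * a) :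
    N / a ∣ N ∧ (N / a) * (N / a) < N := by
  have ha1 : 1 ≤ a := Nat.pos_of_dvd_of_pos hdvd (by omega)
  have hm : a * (N / a) = N := Nat.mul_div_cancel' hdvd
  have hx1 : 1 ≤ N / a := Nat.div_pos (Nat.le_of_dvd (by omega) hdvd) (by omega)
  have hxa : N / a < a := by nlinarith
  exact ⟨⟨a, (Nat.div_mul_cancel hdvd).symm⟩, by nlinarith⟩

-- pairing d ↔ N/d: summing both over divisors d ≤ sqrt N gives 10 * sigma N
lemma pvPairing (N : Nat) (hN : 1 ≤ N) :
    ∑ d ∈ Finset.Icc 1 N.sqrt, pvFA N d = 10 * ∑ d ∈ N.divisors, d := by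
  have hN0 : N ≠ 0 := by omega
  -- restrict to divisors below the square root
  have h1 : ∑ d ∈ Finset.Icc 1 N.sqrt, pvFA N d
      = ∑ d ∈ N.divisors with d * d ≤ N, (10 * d + if d * d ≠ N then 10 * (N / d) else 0) := by
    unfold pvFA
    rw [← Finset.sum_filter]
    have hset : (Finset.Icc 1 N.sqrt).filter (fun d => N % d = 0)
        = N.divisors.filter (fun d => d * d ≤ N) := by
      ext d
      simp only [Finset.mem_filter, Finset.mem_Icc, Nat.mem_divisors]
      constructor
      · rintro ⟨⟨hd1, hd2⟩, h3⟩
        exact ⟨⟨Nat.dvd_of_mod_eq_zero h3, hN0⟩, Nat.le_sqrt.mp hd2⟩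
      · rintro ⟨⟨hdvd, _⟩, hle⟩
        have hd1 : 1 ≤ d := Nat.pos_of_dvd_of_pos hdvd (by omega)
        exact ⟨⟨hd1, Nat.le_sqrt.mpr hle⟩, Nat.mod_eq_zero_of_dvd hdvd⟩
    rw [hset]
    apply Finset.sum_congr rfl
    intro d hd
    simp only [Finset.mem_filter, Nat.mem_divisors] at hd
    have hdvd := hd.1.1
    have hd1 : 1 ≤ d := Nat.pos_of_dvd_of_pos hdvd (by omega)
    have hm : d * (N / d) = N := Nat.mul_div_cancel' hdvd
    by_cases hc : d * d = N
    · have hdn : d = N / d := by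
        have : d * d = d * (N / d) := by rw [hm, hc]
        exact Nat.eq_of_mul_eq_mul_left (by omega) this
      rw [if_neg (fun hne => hne hdn), if_neg (fun hne => hne hc)]
    · have hdn : d ≠ N / d := by
        intro he
        apply hc
        calc d * d = d * (N / d) := by rw [← he]
        _ = N := hm
      rw [if_pos hdn, if_pos hc]
  -- the mirrored large divisors
  have h3 : ∑ d ∈ N.divisors with d * d < N, N / d
      = ∑ d ∈ N.divisors with ¬ d * d ≤ N, d := by
    refine Finset.sum_nbij' (fun d => N / d) (fun d => N / d) ?_ ?_ ?_ ?_ ?_ <;>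
      intro a ha <;> simp only [Finset.mem_filter, Nat.mem_divisors] at *
    · obtain ⟨⟨hdvd, _⟩, hlt⟩ := ha
      obtain ⟨hdd, hgt⟩ := pvDivSq N a hN hdvd hlt
      exact ⟨⟨hdd, hN0⟩, by omega⟩
    · obtain ⟨⟨hdvd, _⟩, hgt⟩ := ha
      obtain ⟨hdd, hlt⟩ := pvDivSq' N a hN hdvd (by omega)
      exact ⟨⟨hdd, hN0⟩, hlt⟩
    · exact Nat.div_div_self ha.1.1 hN0
    · exact Nat.div_div_self ha.1.1 hN0
  -- assemble
  rw [h1, Finset.sum_add_distrib]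
  have h2 : ∑ d ∈ N.divisors with d * d ≤ N, (if d * d ≠ N then 10 * (N / d) else 0)
      = ∑ d ∈ N.divisors with d * d < N, 10 * (N / d) := by
    rw [Finset.sum_filter, Finset.sum_filter]
    apply Finset.sum_congr rfl
    intro d _
    by_cases hle : d * d ≤ N
    · by_cases hlt : d * d < N
      · rw [if_pos hle, if_pos hlt, if_pos (by omega : d * d ≠ N)]
      · rw [if_pos hle, if_neg hlt, if_neg (by omega : ¬ d * d ≠ N)]
    · rw [if_neg hle, if_neg (by omega : ¬ d * d < N)]
  rw [h2, ← Finset.mul_sum, ← Finset.mul_sum, h3, ← Nat.mul_add,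
    Finset.sum_filter_add_sum_filter_not]

lemma pvA_val (N : Nat) (hN : 1 ≤ N) :
    num_presents (N : Int) = (10 * ∑ d ∈ N.divisors, d : Nat) := by
  show (let step : Int := if PySem.Int.mod (N : Int) 2 == 1 then 2 else 1
    let isq : Int := ((N : Int).toNat.sqrt : Int)
    (PySem.List.pyRange 1 (isq + 1) step).foldl
      (fun presents elf =>
        if PySem.Int.mod (N : Int) elf == 0 then
          presents + 10 * elf +
            (if elf != PySem.Int.floordiv (N : Int) elf then 10 * PySem.Int.floordiv (N : Int) elf else 0)
        else presents) 0) = ((10 * ∑ d ∈ N.divisors, d : Nat) : Int)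
  simp only []
  have htn : (N : Int).toNat = N := Int.toNat_natCast N
  rw [htn]
  have hmod : PySem.Int.mod (N : Int) 2 = ((N % 2 : Nat) : Int) := by
    exact_mod_cast PySem.Int.mod_natCast N 2
  have hr1 : 1 ≤ N.sqrt := Nat.le_sqrt.mpr (by omega)
  by_cases hodd : N % 2 = 1
  · rw [if_pos (by rw [hmod, hodd]; rfl)]
    rw [PySem.List.pyRange_of_pos 1 ((N.sqrt : Int) + 1) (by omega : (0:Int) < 2)]
    rw [if_pos (by omega)]
    have hcnt : ((((N.sqrt : Int) + 1) - 1 + 2 - 1) / 2).toNat = (N.sqrt + 1) / 2 := by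
      omega
    rw [hcnt, pvFoldA, zero_add, List.map_map]
    have hfun : ∀ k : Nat, ((fun elf =>
        if PySem.Int.mod (N : Int) elf == 0 then
          10 * elf + (if elf != PySem.Int.floordiv (N : Int) elf then 10 * PySem.Int.floordiv (N : Int) elf else 0)
        else 0) ∘ fun k : Nat => (1 : Int) + 2 * (k : Int)) k = ((pvFA N (1 + 2 * k) : Nat) : Int) := by
      intro k
      have hc : (1 : Int) + 2 * (k : Int) = ((1 + 2 * k : Nat) : Int) := by push_cast; ring
      simp only [Function.comp_apply, hc, pvBody_cast]
    rw [List.map_congr_left (fun k _ => hfun k), pvListSum]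
    rw [← Nat.cast_sum]
    rw [show ∑ i ∈ Finset.range ((N.sqrt + 1) / 2), pvFA N (1 + 2 * i)
        = 10 * ∑ d ∈ N.divisors, d from (pvOddReindex N hodd).trans (pvPairing N hN)]
  · have hev : N % 2 = 0 := by omega
    rw [if_neg (by rw [hmod, hev]; decide)]
    rw [PySem.List.pyRange_one]
    have hcnt : (((N.sqrt : Int) + 1) - 1).toNat = N.sqrt := by omega
    rw [hcnt, pvFoldA, zero_add, List.map_map]
    have hfun : ∀ k : Nat, ((fun elf =>
        if PySem.Int.mod (N : Int) elf == 0 then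
          10 * elf + (if elf != PySem.Int.floordiv (N : Int) elf then 10 * PySem.Int.floordiv (N : Int) elf else 0)
        else 0) ∘ fun k : Nat => (1 : Int) + (k : Int)) k = ((pvFA N (1 + k) : Nat) : Int) := by
      intro k
      have hc : (1 : Int) + (k : Int) = ((1 + k : Nat) : Int) := by omega
      simp only [Function.comp_apply, hc, pvBody_cast]
    rw [List.map_congr_left (fun k _ => hfun k), pvListSum]
    rw [← Nat.cast_sum]
    rw [show ∑ i ∈ Finset.range N.sqrt, pvFA N (1 + i)
        = 10 * ∑ d ∈ N.divisors, d from (pvIccReindex N.sqrt (pvFA N)).trans (pvPairing N hN)]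

lemma pvB_val (N : Nat) (hN : 1 ≤ N) :
    num_presents_alt (N : Int) = (10 * ∑ d ∈ N.divisors, d : Nat) := by
  unfold num_presents_alt
  rw [if_neg (by simp; omega), Int.toNat_natCast,
    pvFactorLoop_sigma N 2 1 (le_refl 2) hN (fun q hq _ => hq.two_le), one_mul]

-- ===== VERDICT (by name: the statement is the Claim_ definition above) =====
theorem num_presents_spec : Claim_equal_num_presents := by
  intro house _ hpre
  unfold Spec_num_presents
  obtain ⟨N, rfl⟩ : ∃ N : Nat, house = (N : Int) := ⟨house.toNat, (Int.toNat_of_nonneg hpre).symm⟩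
  rcases Nat.eq_zero_or_pos N with h0 | h1
  · subst h0; decide
  · rw [pvA_val N h1, pvB_val N h1]
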